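-- pv_equiv track=rewrite | github.com/jieshuh2/Leetcode-Notes | Karat/karat-coursechoice.py | middleCourse
-- ===== SOURCE A (Python) =====
-- def middleCourse(pairs, start, end):
--     shouldBefore = {}
--     shouldAfter = {}
--     courses = set()
--     for pair in  pairs:
--         before, after = pair
--         if before not in shouldAfter:
--             shouldAfter[before] = []
--         shouldAfter[before].append(after)
--         if after not in shouldBefore:
--             shouldBefore[after] = []
--         shouldBefore[after].append(before)
--         courses.add(after)
--         courses.add(before)
--     visited = set()
--     def dfs(node, dictionry):
--         if node in visited:
--             return
--         visited.add(node)
--         if node in dictionry: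
--             for n in dictionry[node]:
--                 dfs(n, dictionry)
--     dfs(start, shouldBefore)
--     dfs(end, shouldAfter)
--     res = []
--     for c in courses:
--         if c not in visited:
--             res.append(c)
--     return res
-- ===== SOURCE B (Python) =====
-- def middleCourse(pairs, start, end):
--     shouldBefore = {}
--     shouldAfter = {}
--     courses = set()
--     for pair in pairs:
--         before, after = pair
--         if before not in shouldAfter:
--             shouldAfter[before] = []
--         shouldAfter[before].append(after)
--         if after not in shouldBefore:
--             shouldBefore[after] = []
--         shouldBefore[after].append(before)
--         courses.add(after)
--         courses.add(before)
--     visited = set()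
--     for seed, adj in ((start, shouldBefore), (end, shouldAfter)):
--         stack = [seed]
--         while stack:
--             node = stack.pop()
--             if node in visited:
--                 continue
--             visited.add(node)
--             stack.extend(reversed(adj.get(node, [])))
--     return [c for c in courses if c not in visited]
-- ===== Notes on version B (the rewrite author's own statement) =====
-- stated objective: alternative
-- what changed: The recursive dfs helper (call-stack recursion over neighbour lists) is replaced by an iterative worklist traversal: an explicit stack seeded with start resp. end, popping a node, skipping visited ones, and pushing its neighbours; the final collection is a comprehension instead of an append loop.
import Mathlib
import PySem

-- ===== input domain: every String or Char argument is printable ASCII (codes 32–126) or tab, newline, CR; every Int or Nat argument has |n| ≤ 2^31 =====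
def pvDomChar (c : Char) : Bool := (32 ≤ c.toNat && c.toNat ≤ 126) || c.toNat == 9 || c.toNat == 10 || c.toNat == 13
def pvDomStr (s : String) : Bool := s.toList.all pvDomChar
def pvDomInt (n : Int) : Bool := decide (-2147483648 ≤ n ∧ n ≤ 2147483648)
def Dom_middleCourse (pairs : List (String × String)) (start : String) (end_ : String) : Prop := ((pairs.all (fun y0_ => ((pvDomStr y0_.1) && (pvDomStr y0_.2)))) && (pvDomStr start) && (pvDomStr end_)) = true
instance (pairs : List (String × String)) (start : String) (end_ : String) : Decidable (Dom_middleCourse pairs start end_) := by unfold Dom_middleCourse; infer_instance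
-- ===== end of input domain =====

-- B replaces A's recursive dfs helper by an iterative explicit-stack traversal (same visited
-- set, same adjacency dicts) and collects the result with a comprehension; same cost, no recursion.
-- NOTE: the final Python loop iterates a set; its hash order is modelled as insertion order (PySem.Set).

-- the edge loop both versions share verbatim: builds shouldBefore, shouldAfter and courses
def pvBuildStep
    (st : PySem.Dict String (List String) × PySem.Dict String (List String) × PySem.Set String)
    (pair : String × String) :
    PySem.Dict String (List String) × PySem.Dict String (List String) × PySem.Set String :=
    let before := pair.1
    let after := pair.2
    -- 'if before not in shouldAfter: shouldAfter[before] = []'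
    let sa := if PySem.Dict.contains st.2.1 before then st.2.1 else PySem.Dict.insert st.2.1 before []
    -- 'shouldAfter[before].append(after)' (in-place update of the value; overwrite keeps position)
    let sa := PySem.Dict.insert sa before (PySem.Dict.getD sa before [] ++ [after])
    let sb := if PySem.Dict.contains st.1 after then st.1 else PySem.Dict.insert st.1 after []
    let sb := PySem.Dict.insert sb after (PySem.Dict.getD sb after [] ++ [before])
    let cs := PySem.Set.add (PySem.Set.add st.2.2 after) before
    (sb, sa, cs)

def pvBuild (pairs : List (String × String)) :
    PySem.Dict String (List String) × PySem.Dict String (List String) × PySem.Set String :=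
  pairs.foldl pvBuildStep (PySem.Dict.empty, PySem.Dict.empty, PySem.Set.empty)

-- ===== PORT A =====
-- A's recursive dfs; fuel only bounds the recursion depth (each level marks a fresh node, so
-- the fuel chosen in middleCourse is never exhausted)
def pvDfsA (fuel : Nat) (d : PySem.Dict String (List String)) (node : String)
    (visited : PySem.Set String) : PySem.Set String :=
  match fuel with
  | 0 => visited
  | fuel + 1 =>
    if PySem.Set.contains visited node then visited
    else
      let visited := PySem.Set.add visited node
      match d.get? node with
      | some ns => ns.foldl (fun v m => pvDfsA fuel d m v) visited
      | none => visited

def middleCourse (pairs : List (String × String)) (start : String) (end_ : String) : List String :=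
  let g := pvBuild pairs
  let fuel := 2 * pairs.length + 3
  let v1 := pvDfsA fuel g.1 start PySem.Set.empty
  let v2 := pvDfsA fuel g.2.1 end_ v1
  g.2.2.foldl (fun res c => if PySem.Set.contains v2 c then res else res ++ [c]) []

-- ===== PORT B =====
-- termination ghost: a list containing every string the traversal can ever stack
def pvUniv (pairs : List (String × String)) (start : String) (end_ : String) : List String :=
  start :: end_ :: (pairs.map (·.1) ++ pairs.map (·.2))

def pvUnvis (U : List String) (V : PySem.Set String) : Nat :=
  (U.filter (fun x => !(PySem.Set.contains V x))).length

theorem pvContains_add (V : PySem.Set String) (n x : String) :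
    PySem.Set.contains (PySem.Set.add V n) x = (PySem.Set.contains V x || x == n) := by
  simp only [PySem.Set.add, PySem.Set.contains]
  split_ifs with h <;> by_cases hx : x = n <;>
    simp_all [List.contains_iff_mem]

theorem pvUnvis_mono (U : List String) (V V' : PySem.Set String)
    (h : ∀ x, PySem.Set.contains V x = true → PySem.Set.contains V' x = true) :
    pvUnvis U V' ≤ pvUnvis U V := by
  induction U with
  | nil => simp [pvUnvis]
  | cons u t ih =>
    simp only [pvUnvis, List.filter_cons]
    cases h2 : (!PySem.Set.contains V' u) <;> cases h1 : (!PySem.Set.contains V u) <;>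
      simp_all [pvUnvis] <;> omega

theorem pvUnvis_add_le (U : List String) (V : PySem.Set String) (n : String) :
    pvUnvis U (PySem.Set.add V n) ≤ pvUnvis U V := by
  refine pvUnvis_mono U V _ (fun x hx => ?_)
  rw [pvContains_add, hx, Bool.true_or]

theorem pvUnvis_add_lt (U : List String) (V : PySem.Set String) (n : String)
    (hU : n ∈ U) (hn : PySem.Set.contains V n = false) :
    pvUnvis U (PySem.Set.add V n) < pvUnvis U V := by
  induction U with
  | nil => cases hU
  | cons u t ih =>
    simp only [pvUnvis, List.filter_cons]
    rcases List.mem_cons.mp hU with rfl | hu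
    · rw [pvContains_add, hn, beq_self_eq_true]
      simp only [Bool.false_or, Bool.not_true, hn, Bool.not_false, if_true, if_false]
      have := pvUnvis_add_le t V n
      simp only [pvUnvis] at this
      simpa using Nat.lt_succ_of_le this
    · have ht := ih hu
      simp only [pvUnvis] at ht
      cases h2 : (!PySem.Set.contains (PySem.Set.add V n) u) <;>
        cases h1 : (!PySem.Set.contains V u) <;>
        simp_all [pvContains_add] <;> omega

theorem pvUnvis_add_eq (U : List String) (V : PySem.Set String) (n : String)
    (hU : n ∉ U) : pvUnvis U (PySem.Set.add V n) = pvUnvis U V := by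
  unfold pvUnvis
  rw [List.filter_congr]
  intro x hx
  have hxn : x ≠ n := fun h => hU (h ▸ hx)
  rw [pvContains_add]
  simp [hxn]

-- B's while-loop: explicit stack (list head = top of the Python stack); pop, skip visited,
-- otherwise mark and push the node's neighbours
def pvGoB (d : PySem.Dict String (List String)) (U : List String) :
    List String → PySem.Set String → PySem.Set String
  | [], V => V
  | n :: rest, V =>
    if hv : PySem.Set.contains V n = true then pvGoB d U rest V
    else if hu : n ∈ U then pvGoB d U (d.getD n [] ++ rest) (PySem.Set.add V n)
    else pvGoB d U rest (PySem.Set.add V n)  -- unreachable: every stacked node lies in U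
  termination_by stack V => (pvUnvis U V, stack.length)
  decreasing_by
  · exact Prod.Lex.right _ (by simp)
  · exact Prod.Lex.left _ _ (pvUnvis_add_lt U V n hu (by simpa using hv))
  · rw [pvUnvis_add_eq U V n hu]; exact Prod.Lex.right _ (by simp)

def middleCourse_alt (pairs : List (String × String)) (start : String) (end_ : String) : List String :=
  let g := pvBuild pairs
  let U := pvUniv pairs start end_
  let v1 := pvGoB g.1 U [start] PySem.Set.empty
  let v2 := pvGoB g.2.1 U [end_] v1
  g.2.2.filter (fun c => !(PySem.Set.contains v2 c))

-- ===== PRECONDITION & SPEC =====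
def Spec_middleCourse (pairs : List (String × String)) (start : String) (end_ : String) (out : List String) : Prop := out = middleCourse_alt pairs start end_
instance (pairs : List (String × String)) (start : String) (end_ : String) (out : List String) : Decidable (Spec_middleCourse pairs start end_ out) := by unfold Spec_middleCourse; infer_instance

-- ===== CLAIM (what is proved, stated in full; the proofs are below) =====
def Claim_equal_middleCourse : Prop := ∀ (pairs : List (String × String)) (start : String) (end_ : String), Dom_middleCourse pairs start end_ → Spec_middleCourse pairs start end_ (middleCourse pairs start end_)

-- ===== LEMMAS AND PROOFS =====

-- every neighbour list stored in d consists of members of U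
def pvHval (d : PySem.Dict String (List String)) (U : List String) : Prop :=
  ∀ k ns, d.get? k = some ns → ∀ m ∈ ns, m ∈ U

-- pvDfsA only appends to the visited set
theorem pvDfsA_prefix (f : Nat) (d : PySem.Dict String (List String)) :
    ∀ (n : String) (V : PySem.Set String), ∃ t, pvDfsA f d n V = V ++ t := by
  induction f with
  | zero => intro n V; exact ⟨[], by rw [pvDfsA, List.append_nil]⟩
  | succ f ih =>
    intro n V
    rw [pvDfsA]
    split_ifs with hc
    · exact ⟨[], (List.append_nil V).symm⟩
    · have hadd : PySem.Set.add V n = V ++ [n] := by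
        have hmem : n ∉ V := by simpa [List.contains_iff_mem] using hc
        simp [PySem.Set.add, hmem]
      have aux : ∀ (ms : List String) (acc : PySem.Set String),
          ∃ t, ms.foldl (fun v m => pvDfsA f d m v) acc = acc ++ t := by
        intro ms
        induction ms with
        | nil => exact fun acc => ⟨[], by simp⟩
        | cons m ms ihm =>
          intro acc
          obtain ⟨t1, h1⟩ := ih m acc
          obtain ⟨t2, h2⟩ := ihm (pvDfsA f d m acc)
          refine ⟨t1 ++ t2, ?_⟩
          simp only [List.foldl]
          rw [h2, h1, List.append_assoc]
      cases hget : d.get? n with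
      | none => exact ⟨[n], hadd⟩
      | some ns =>
        obtain ⟨t, ht⟩ := aux ns (PySem.Set.add V n)
        refine ⟨[n] ++ t, ?_⟩
        show List.foldl (fun v m => pvDfsA f d m v) (PySem.Set.add V n) ns = V ++ ([n] ++ t)
        rw [ht, hadd, List.append_assoc]

theorem pvDfsA_contains_mono (f : Nat) (d : PySem.Dict String (List String))
    (n x : String) (V : PySem.Set String) (hx : PySem.Set.contains V x = true) :
    PySem.Set.contains (pvDfsA f d n V) x = true := by
  obtain ⟨t, ht⟩ := pvDfsA_prefix f d n V
  rw [ht]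
  simp only [PySem.Set.contains, List.contains_iff_mem] at hx ⊢
  exact List.mem_append_left _ hx

theorem pvUnvis_dfsA_le (U : List String) (f : Nat) (d : PySem.Dict String (List String))
    (n : String) (V : PySem.Set String) :
    pvUnvis U (pvDfsA f d n V) ≤ pvUnvis U V :=
  pvUnvis_mono U V _ (fun x hx => pvDfsA_contains_mono f d n x V hx)

-- with enough fuel, the result of pvDfsA does not depend on the exact fuel
theorem pvDfsA_fuel (d : PySem.Dict String (List String)) (U : List String)
    (Hval : pvHval d U) :
    ∀ c f g (n : String) (V : PySem.Set String), n ∈ U → pvUnvis U V ≤ c →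
      c < f → c < g → pvDfsA f d n V = pvDfsA g d n V := by
  intro c
  induction c using Nat.strong_induction_on with
  | _ c IH =>
    intro f g n V hn hc hf hg
    obtain ⟨f', rfl⟩ : ∃ f', f = f' + 1 := ⟨f - 1, by omega⟩
    obtain ⟨g', rfl⟩ : ∃ g', g = g' + 1 := ⟨g - 1, by omega⟩
    rw [pvDfsA, pvDfsA]
    split_ifs with hcv
    · rfl
    · cases hget : d.get? n with
      | none => rfl
      | some ns =>
        have hlt : pvUnvis U (PySem.Set.add V n) < c :=
          lt_of_lt_of_le (pvUnvis_add_lt U V n hn (by simpa using hcv)) hc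
        have key : ∀ (ms : List String), (∀ m ∈ ms, m ∈ U) →
            ∀ acc, pvUnvis U acc ≤ pvUnvis U (PySem.Set.add V n) →
            ms.foldl (fun v m => pvDfsA f' d m v) acc =
            ms.foldl (fun v m => pvDfsA g' d m v) acc := by
          intro ms
          induction ms with
          | nil => intros; rfl
          | cons m ms ihm =>
            intro hmem acc hacc
            simp only [List.foldl]
            have e1 : pvDfsA f' d m acc = pvDfsA g' d m acc :=
              IH (pvUnvis U (PySem.Set.add V n)) hlt f' g' m acc
                (hmem m (List.mem_cons_self ..)) hacc (by omega) (by omega)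
            rw [e1]
            exact ihm (fun x hx => hmem x (List.mem_cons_of_mem _ hx)) _
              (le_trans (pvUnvis_dfsA_le U g' d m acc) hacc)
        exact key ns (Hval n ns hget) (PySem.Set.add V n) le_rfl

theorem pvDfsA_fuel_fold (d : PySem.Dict String (List String)) (U : List String)
    (Hval : pvHval d U) (c f g : Nat) :
    ∀ (ms : List String), (∀ m ∈ ms, m ∈ U) → ∀ acc, pvUnvis U acc ≤ c →
      c < f → c < g →
      ms.foldl (fun v m => pvDfsA f d m v) acc = ms.foldl (fun v m => pvDfsA g d m v) acc := by
  intro ms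
  induction ms with
  | nil => intros; rfl
  | cons m ms ihm =>
    intro hmem acc hacc hf hg
    simp only [List.foldl]
    rw [pvDfsA_fuel d U Hval c f g m acc (hmem m (List.mem_cons_self ..)) hacc hf hg]
    exact ihm (fun x hx => hmem x (List.mem_cons_of_mem _ hx)) _
      (le_trans (pvUnvis_dfsA_le U g d m acc) hacc) hf hg

-- the explicit-stack loop computes exactly the fold of the recursive dfs over the stack
theorem pvGoB_eq_foldl (d : PySem.Dict String (List String)) (U : List String)
    (Hval : pvHval d U) :
    ∀ c (stack : List String) (V : PySem.Set String), (∀ x ∈ stack, x ∈ U) →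
      pvUnvis U V ≤ c → ∀ f, c < f →
      pvGoB d U stack V = stack.foldl (fun a n => pvDfsA f d n a) V := by
  intro c
  induction c using Nat.strong_induction_on with
  | _ c IH =>
    intro stack
    induction stack with
    | nil => intro V _ _ f _; simp [pvGoB]
    | cons n rest ihs =>
      intro V hst hc f hf
      obtain ⟨f', rfl⟩ : ∃ f', f = f' + 1 := ⟨f - 1, by omega⟩
      have hnU : n ∈ U := hst n (List.mem_cons_self ..)
      rw [pvGoB]
      by_cases hcv : PySem.Set.contains V n = true
      · rw [dif_pos hcv]
        simp only [List.foldl]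
        have hdn : pvDfsA (f' + 1) d n V = V := by rw [pvDfsA, if_pos hcv]
        rw [hdn]
        exact ihs V (fun x hx => hst x (List.mem_cons_of_mem _ hx)) hc _ hf
      · rw [dif_neg hcv, dif_pos hnU]
        have hlt : pvUnvis U (PySem.Set.add V n) < c :=
          lt_of_lt_of_le (pvUnvis_add_lt U V n hnU (by simpa using hcv)) hc
        have hstack' : ∀ x ∈ d.getD n [] ++ rest, x ∈ U := by
          intro x hx
          rcases List.mem_append.mp hx with hx | hx
          · rw [PySem.Dict.getD_eq_get?_getD] at hx
            cases hget : d.get? n with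
            | none => rw [hget] at hx; simp at hx
            | some ns => rw [hget] at hx; exact Hval n ns hget x hx
          · exact hst x (List.mem_cons_of_mem _ hx)
        rw [IH (pvUnvis U (PySem.Set.add V n)) hlt _ _ hstack' le_rfl (f' + 1) (by omega)]
        rw [List.foldl_append]
        simp only [List.foldl]
        have hdfs : pvDfsA (f' + 1) d n V =
            (d.getD n []).foldl (fun v m => pvDfsA f' d m v) (PySem.Set.add V n) := by
          rw [pvDfsA, if_neg hcv]
          rw [PySem.Dict.getD_eq_get?_getD]
          cases hget : d.get? n <;> simp
        rw [hdfs]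
        congr 1
        rw [PySem.Dict.getD_eq_get?_getD]
        cases hget : d.get? n with
        | none => rfl
        | some ns =>
          simp only [Option.getD_some]
          exact (pvDfsA_fuel_fold d U Hval (pvUnvis U (PySem.Set.add V n)) f' (f' + 1)
            ns (Hval n ns hget) _ le_rfl (by omega) (by omega)).symm

-- the build loop keeps every stored neighbour inside U
theorem pvHval_insert (d : PySem.Dict String (List String)) (U : List String)
    (k : String) (vs : List String) (hd : pvHval d U) (hvs : ∀ m ∈ vs, m ∈ U) :
    pvHval (d.insert k vs) U := by
  intro k' ns hget m hm
  rw [PySem.Dict.get?_insert] at hget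
  split_ifs at hget with h
  · cases hget; exact hvs m hm
  · exact hd k' ns hget m hm

theorem pvHval_getD (d : PySem.Dict String (List String)) (U : List String)
    (k : String) (hd : pvHval d U) : ∀ m ∈ d.getD k [], m ∈ U := by
  intro m hm
  rw [PySem.Dict.getD_eq_get?_getD] at hm
  cases hget : d.get? k with
  | none => rw [hget] at hm; simp at hm
  | some ns => rw [hget] at hm; exact hd k ns hget m hm

theorem pvBuild_inv (U : List String) :
    ∀ (l : List (String × String))
      (st : PySem.Dict String (List String) × PySem.Dict String (List String) × PySem.Set String),
      (∀ p ∈ l, p.1 ∈ U ∧ p.2 ∈ U) → pvHval st.1 U → pvHval st.2.1 U →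
      pvHval (l.foldl pvBuildStep st).1 U ∧ pvHval (l.foldl pvBuildStep st).2.1 U := by
  intro l
  induction l with
  | nil => intro st _ h1 h2; exact ⟨h1, h2⟩
  | cons p l ih =>
    intro st hl h1 h2
    have hp := hl p (List.mem_cons_self ..)
    simp only [List.foldl]
    apply ih _ (fun q hq => hl q (List.mem_cons_of_mem _ hq))
    · -- shouldBefore component
      show pvHval (pvBuildStep st p).1 U
      unfold pvBuildStep
      have hsb1 : pvHval (if PySem.Dict.contains st.1 p.2 then st.1
          else PySem.Dict.insert st.1 p.2 []) U := by
        split_ifs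
        · exact h1
        · exact pvHval_insert _ _ _ _ h1 (by simp)
      apply pvHval_insert _ _ _ _ hsb1
      intro m hm
      rcases List.mem_append.mp hm with hm | hm
      · exact pvHval_getD _ _ _ hsb1 m hm
      · simp only [List.mem_singleton] at hm; exact hm ▸ hp.1
    · -- shouldAfter component
      show pvHval (pvBuildStep st p).2.1 U
      unfold pvBuildStep
      have hsa1 : pvHval (if PySem.Dict.contains st.2.1 p.1 then st.2.1
          else PySem.Dict.insert st.2.1 p.1 []) U := by
        split_ifs
        · exact h2
        · exact pvHval_insert _ _ _ _ h2 (by simp)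
      apply pvHval_insert _ _ _ _ hsa1
      intro m hm
      rcases List.mem_append.mp hm with hm | hm
      · exact pvHval_getD _ _ _ hsa1 m hm
      · simp only [List.mem_singleton] at hm; exact hm ▸ hp.2

theorem pvUnvis_le_length (U : List String) (V : PySem.Set String) :
    pvUnvis U V ≤ U.length :=
  le_trans (List.length_filter_le _ _) le_rfl

theorem pvFoldl_filter (p : String → Bool) :
    ∀ (cs res : List String),
      cs.foldl (fun r c => if p c then r else r ++ [c]) res = res ++ cs.filter (fun c => !p c) := by
  intro cs
  induction cs with
  | nil => simp
  | cons c cs ih =>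
    intro res
    simp only [List.foldl, List.filter_cons]
    cases hp : p c <;> simp [ih]

theorem middleCourse_main (pairs : List (String × String)) (start end_ : String) :
    middleCourse pairs start end_ = middleCourse_alt pairs start end_ := by
  unfold middleCourse middleCourse_alt
  have hinv := pvBuild_inv (pvUniv pairs start end_) pairs
    (PySem.Dict.empty, PySem.Dict.empty, PySem.Set.empty)
    (fun p hp => by
      unfold pvUniv
      exact ⟨List.mem_cons_of_mem _ (List.mem_cons_of_mem _
              (List.mem_append_left _ (List.mem_map_of_mem hp))),
             List.mem_cons_of_mem _ (List.mem_cons_of_mem _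
              (List.mem_append_right _ (List.mem_map_of_mem hp)))⟩)
    (fun k ns h => by simp [PySem.Dict.get?_empty] at h)
    (fun k ns h => by simp [PySem.Dict.get?_empty] at h)
  have hU1 : start ∈ pvUniv pairs start end_ := by simp [pvUniv]
  have hU2 : end_ ∈ pvUniv pairs start end_ := by simp [pvUniv]
  have hlen : (pvUniv pairs start end_).length = 2 * pairs.length + 2 := by
    simp [pvUniv]; omega
  have hF : ∀ V : PySem.Set String,
      pvUnvis (pvUniv pairs start end_) V < 2 * pairs.length + 3 := by
    intro V
    have := pvUnvis_le_length (pvUniv pairs start end_) V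
    omega
  have e1 : pvGoB (pvBuild pairs).1 (pvUniv pairs start end_) [start] PySem.Set.empty =
      pvDfsA (2 * pairs.length + 3) (pvBuild pairs).1 start PySem.Set.empty := by
    rw [pvGoB_eq_foldl (pvBuild pairs).1 (pvUniv pairs start end_) hinv.1
      (pvUnvis (pvUniv pairs start end_) PySem.Set.empty) [start] PySem.Set.empty
      (by simpa using hU1) le_rfl _ (hF _)]
    rfl
  have e2 : pvGoB (pvBuild pairs).2.1 (pvUniv pairs start end_) [end_]
        (pvDfsA (2 * pairs.length + 3) (pvBuild pairs).1 start PySem.Set.empty) =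
      pvDfsA (2 * pairs.length + 3) (pvBuild pairs).2.1 end_
        (pvDfsA (2 * pairs.length + 3) (pvBuild pairs).1 start PySem.Set.empty) := by
    rw [pvGoB_eq_foldl (pvBuild pairs).2.1 (pvUniv pairs start end_) hinv.2
      (pvUnvis (pvUniv pairs start end_)
        (pvDfsA (2 * pairs.length + 3) (pvBuild pairs).1 start PySem.Set.empty))
      [end_] _ (by simpa using hU2) le_rfl _ (hF _)]
    rfl
  simp only [e1, e2]
  exact pvFoldl_filter _ (pvBuild pairs).2.2 []

-- ===== VERDICT (by name: the statement is the Claim_ definition above) =====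
theorem middleCourse_spec : Claim_equal_middleCourse := by
  intro pairs start end_ _
  unfold Spec_middleCourse
  exact middleCourse_main pairs start end_
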